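/-
  Vorbis/ResidueMapping.lean MEETS Vorbis/Arena.lean: the block predicate `Blk` of the residue / mapping structures instantiated
  with INVARIANTS' `Block(p, n)` = "is a setup block of the arena ghost" (`Arena.Blk`, Vorbis/Arena.lean §7). This instance gives
  what liveness alone does not: every owned block is disjoint from every temp block and from every other setup block, so a store
  into the temp block of decode_residue (or into a channel buffer) keeps `ResidueOK` / `MappingOK` with no further hypothesis.
  (The general form, for the whole CONFIG part of the invariant and any batch of stores, is `ConfigOK.frame_stores` of
  Vorbis/Invariant/Config.lean; this file is the worked instance for one group and one store.)
-/
import Vorbis.Arena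
import Vorbis.ResidueMapping
namespace Vorbis
open X86 X86.User Asan

variable {A : Arena} {others : List Obj} {mem : Mem} {f : Nat}

/-- **decode_residue, pass 0: the store `part_classdata[j][class_set] = …` into the temp block keeps `ResidueOK`.** `*f` is the
arena copy (a setup block of 1808 bytes: P5), the codebooks block is CB0's. -/
theorem ResidueOK.store_tblock (hA : ArenaOK A others mem f) (h : ResidueOK A.Blk mem f)
    (hf : A.Blk (objBlock f))
    (hcb : A.Blk ⟨stb_vorbis.codebooks mem f, Off.sizeof.Codebook * (stb_vorbis.codebook_count mem f).toNat⟩)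
    {q m : Nat} (hT : A.TBlock q m) {b k : Nat} (v : Nat) (hb : (Block.mk q m).contains b k) :
    ResidueOK A.Blk (mem.writeLE (addr b) k v) f := by
  have hfk := hA.kept_of_store_tblock hf hT v hb
  apply h.frame (ObjSame.of_same hfk.same hfk.inside)
  intro B hB
  exact hA.kept_of_store_tblock (h.reads_blk hcb hB) hT v hb

/-- The same for `MappingOK` (inverse coupling stores into channel buffers are `BlkOK.kept_store`; a store into the temp block is
this). -/
theorem MappingOK.store_tblock (hA : ArenaOK A others mem f) (h : MappingOK A.Blk mem f) (hf : A.Blk (objBlock f))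
    {q m : Nat} (hT : A.TBlock q m) {b k : Nat} (v : Nat) (hb : (Block.mk q m).contains b k) :
    MappingOK A.Blk (mem.writeLE (addr b) k v) f := by
  have hfk := hA.kept_of_store_tblock hf hT v hb
  apply h.frame (ObjSame.of_same hfk.same hfk.inside)
  intro B hB
  exact hA.kept_of_store_tblock (h.reads_blk hB) hT v hb

end Vorbis
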